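-- pv_equiv track=rewrite | github.com/jeff-yjr/harricane_analysis | script.py | count_areas
-- ===== SOURCE A (Python) =====
-- def count_areas(hurricanes_table):
--   area_dic = {}
--   for value in hurricanes_table.values():
--     current_region = value['Areas Affected']
--     for area in current_region:
--       if area in area_dic:
--         area_dic[area] +=1
--       else:
--         area_dic[area] = 1
--
--   return area_dic
-- ===== SOURCE B (Python) =====
-- def count_areas(hurricanes_table):
--     # Flatten every hurricane's affected areas into one list, then repeatedly
--     # take the first remaining area, record how many times it occurs, and strip
--     # all its occurrences from the worklist (select-and-remove, no hash updates).
--     rest = [area for value in hurricanes_table.values()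
--             for area in value['Areas Affected']]
--     result = {}
--     while rest:
--         head = rest[0]
--         result[head] = rest.count(head)
--         rest = [x for x in rest if x != head]
--     return result
-- ===== Notes on version B (the rewrite author's own statement) =====
-- stated objective: alternative
-- what changed: B flattens all areas into one worklist and repeatedly takes the first remaining area, records its multiplicity with list.count, and strips all its occurrences (select-and-remove), instead of A's per-occurrence hash-increment over nested loops.
import Mathlib
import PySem

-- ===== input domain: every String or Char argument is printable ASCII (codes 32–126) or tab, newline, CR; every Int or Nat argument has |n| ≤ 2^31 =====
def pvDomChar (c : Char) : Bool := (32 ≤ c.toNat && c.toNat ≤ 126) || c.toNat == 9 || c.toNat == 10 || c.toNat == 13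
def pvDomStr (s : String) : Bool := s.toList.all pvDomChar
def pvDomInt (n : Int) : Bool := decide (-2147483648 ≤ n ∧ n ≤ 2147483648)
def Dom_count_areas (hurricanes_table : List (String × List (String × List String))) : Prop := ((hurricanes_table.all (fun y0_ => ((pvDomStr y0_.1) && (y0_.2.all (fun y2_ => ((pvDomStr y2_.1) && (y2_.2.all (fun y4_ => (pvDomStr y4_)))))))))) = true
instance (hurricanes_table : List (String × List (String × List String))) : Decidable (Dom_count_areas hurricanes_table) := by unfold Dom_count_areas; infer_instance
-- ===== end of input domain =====

-- One line: B flattens all areas into one worklist and repeatedly takes the first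
-- remaining area, records its multiplicity with count, and strips all its
-- occurrences, instead of A's per-occurrence hash-increment over nested loops.

-- ===== PORT A =====
-- A: for each hurricane, look up 'Areas Affected' and increment a counter dict per area.
-- (getD … [] is unreachable default: Pre_ guarantees the key is present, as Python A
--  raises KeyError otherwise.)
def count_areas (hurricanes_table : List (String × List (String × List String))) : List (String × Int) :=
  (hurricanes_table.foldl
    (fun area_dic value =>
      let current_region := (PySem.Dict.mk value.2).getD "Areas Affected" []
      current_region.foldl
        (fun area_dic area =>
          if area_dic.contains area then
            area_dic.insert area (area_dic.getD area 0 + 1)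
          else
            area_dic.insert area 1)
        area_dic)
    PySem.Dict.empty).items

-- ===== PORT B =====
-- B's while loop: take the head of the worklist, record (head, rest.count head),
-- strip every occurrence of head, repeat.  Every key recorded is fresh (all its
-- occurrences were just stripped), so the Python dict grows strictly at the end:
-- the loop is this recursion emitting the pairs in order.
def pvGroup (rest : List String) : List (String × Int) :=
  match rest with
  | [] => []
  | head :: tail =>
      (head, ((head :: tail).count head : Int)) ::
        pvGroup (tail.filter (fun x => !(x == head)))
termination_by rest.length
decreasing_by
  refine Nat.lt_succ_of_le ?_
  rw [List.length_unattach]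
  exact le_trans (List.length_filter_le _ _) (le_of_eq (List.length_attach))

def count_areas_alt (hurricanes_table : List (String × List (String × List String))) : List (String × Int) :=
  pvGroup (hurricanes_table.flatMap
    (fun value => (PySem.Dict.mk value.2).getD "Areas Affected" []))

-- ===== PRECONDITION & SPEC =====
-- Pre_ excludes exactly the inputs where Python A raises KeyError: some hurricane's
-- record has no 'Areas Affected' key.
def Pre_count_areas (hurricanes_table : List (String × List (String × List String))) : Prop :=
  ∀ p ∈ hurricanes_table, (p.2.any (fun q => q.1 == "Areas Affected")) = true
instance (hurricanes_table : List (String × List (String × List String))) : Decidable (Pre_count_areas hurricanes_table) := by unfold Pre_count_areas; infer_instance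

def pvWitness_count_areas : (List (String × List (String × List String))) :=
  [("H1", [("Areas Affected", ["x", "y", "x"])]), ("H2", [("Areas Affected", ["y", "z"])])]

def Spec_count_areas (hurricanes_table : List (String × List (String × List String))) (out : List (String × Int)) : Prop := out = count_areas_alt hurricanes_table
instance (hurricanes_table : List (String × List (String × List String))) (out : List (String × Int)) : Decidable (Spec_count_areas hurricanes_table out) := by unfold Spec_count_areas; infer_instance

-- ===== CLAIM (what is proved, stated in full; the proofs are below) =====
def Claim_equal_count_areas : Prop := ∀ (hurricanes_table : List (String × List (String × List String))), Dom_count_areas hurricanes_table → Pre_count_areas hurricanes_table → Spec_count_areas hurricanes_table (count_areas hurricanes_table)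

-- ===== LEMMAS AND PROOFS =====

-- A's if/else branch IS the counter-increment step.
theorem a_step_eq (d : PySem.Dict String Int) (a : String) :
    (if d.contains a then d.insert a (d.getD a 0 + 1) else d.insert a 1)
      = d.insert a (d.getD a 0 + 1) := by
  split_ifs with h
  · rfl
  · rw [PySem.Dict.getD_of_not_contains]
    · norm_num
    · simpa using h

-- folding over a flatMap is the nested fold
theorem foldl_flatMap {α β γ : Type} (g : α → List β) (f : γ → β → γ) :
    ∀ (l : List α) (init : γ),
      (l.flatMap g).foldl f init = l.foldl (fun acc v => (g v).foldl f acc) init := by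
  intro l
  induction l with
  | nil => intro init; rfl
  | cons x t ih => intro init; simp [List.flatMap_cons, List.foldl_append, ih]

-- set-of-list commutes with stripping one element
theorem ofList_strip (a : String) :
    ∀ (xs : List String),
      PySem.Set.ofList (xs.filter (fun x => !(x == a)))
        = (PySem.Set.ofList xs).filter (fun x => !(x == a)) := by
  intro xs
  induction xs with
  | nil => simp [PySem.Set.ofList_nil]
  | cons y t ih =>
    by_cases h : y = a
    · subst h
      simp [PySem.Set.ofList_cons, PySem.Set.discard, List.filter_filter, ih]
    · have hb : (!(y == a)) = true := by simp [h]
      simp only [List.filter_cons, hb, if_pos, PySem.Set.ofList_cons,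
        PySem.Set.discard, ih, List.filter_filter]
      congr 1
      apply List.filter_congr
      intro x _
      rw [Bool.and_comm]

-- B's select-and-remove recursion produces Counter(xs).items(): the distinct
-- elements in first-occurrence order, each with its total count.
theorem pvGroup_eq_counter (xs : List String) :
    pvGroup xs = (PySem.Set.ofList xs).map (fun k => (k, (xs.count k : Int))) := by
  induction xs using pvGroup.induct with
  | case1 => simp [pvGroup, PySem.Set.ofList_nil]
  | case2 head tail ih =>
    rw [List.unattach_filter (g := fun x => !(x == head)) (hf := fun x h => rfl),
        List.unattach_attach] at ih
    rw [pvGroup, ih, PySem.Set.ofList_cons]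
    simp only [PySem.Set.discard, List.map_cons, ofList_strip]
    congr 1
    apply List.map_congr_left
    intro k hk
    have hkne : (!(k == head)) = true := by
      have := (List.mem_filter.mp hk).2
      simpa using this
    have hne : k ≠ head := by simpa using hkne
    have hp : (fun x => !(x == head)) k = true := by simpa using hne
    have h1 : List.count k (List.filter (fun x => !(x == head)) tail) = List.count k tail :=
      List.count_filter (p := fun x => !(x == head)) hp
    congr 1
    rw [h1, List.count_cons_of_ne hne.symm]

-- ===== VERDICT (by name: the statement is the Claim_ definition above) =====
theorem count_areas_spec : Claim_equal_count_areas := by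
  intro t _ _
  unfold Spec_count_areas count_areas count_areas_alt
  set g : (String × List (String × List String)) → List String :=
    fun value => (PySem.Dict.mk value.2).getD "Areas Affected" [] with hg
  set flat := t.flatMap g with hflat
  have hA : (t.foldl
      (fun area_dic value =>
        (g value).foldl
          (fun area_dic area =>
            if area_dic.contains area then
              area_dic.insert area (area_dic.getD area 0 + 1)
            else
              area_dic.insert area 1)
          area_dic)
      (PySem.Dict.empty : PySem.Dict String Int)).items
      = (PySem.Dict.counter flat).items := by
    have hstep : ∀ (xs : List String) (d : PySem.Dict String Int),
        xs.foldl
          (fun area_dic area =>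
            if area_dic.contains area then
              area_dic.insert area (area_dic.getD area 0 + 1)
            else
              area_dic.insert area 1) d
        = xs.foldl (fun d x => d.insert x (d.getD x 0 + 1)) d := by
      intro xs d
      apply PySem.List.foldl_congr_mem
      intro acc x _
      exact a_step_eq acc x
    calc (t.foldl
          (fun area_dic value =>
            (g value).foldl
              (fun area_dic area =>
                if area_dic.contains area then
                  area_dic.insert area (area_dic.getD area 0 + 1)
                else
                  area_dic.insert area 1)
              area_dic)
          (PySem.Dict.empty : PySem.Dict String Int)).items
        = (t.foldl
            (fun d value => (g value).foldl (fun d x => d.insert x (d.getD x 0 + 1)) d)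
            (PySem.Dict.empty : PySem.Dict String Int)).items := by
          congr 1
          apply PySem.List.foldl_congr_mem
          intro acc x _
          exact hstep (g x) acc
      _ = (flat.foldl (fun d x => d.insert x (d.getD x 0 + 1)) (PySem.Dict.empty : PySem.Dict String Int)).items := by
          rw [hflat, foldl_flatMap]
      _ = (PySem.Dict.counter flat).items := by
          rw [PySem.Dict.foldl_insert_getD_add_one_eq_counter]
  rw [hA, PySem.Dict.items_counter, pvGroup_eq_counter]
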